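-- pv_equiv track=rewrite | github.com/Modern-Compilers-Lab/Quantum-Compiler | qlosure/src/mapping/heuristic.py | create_leveled_extended_successor_set
-- ===== SOURCE A (Python) =====
-- from collections import deque
--
-- def create_leveled_extended_successor_set(front_points, dag, access, extended_set_size=40):
--     visited = []
--     layer_index = {}
--     queue = deque()
--
--     for point in front_points:
--         queue.append((point, 1))
--
--     while queue and len(visited) < extended_set_size:
--         current, current_layer = queue.popleft()
--
--         if current in dag:
--             for succ in dag[current]:
--                 if succ not in layer_index:
--                     visited.append(succ)
--                     layer_index[succ] = current_layer + 1
--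
--                     queue.append((succ, current_layer + 1))
--
--                     if len(visited) >= extended_set_size:
--                         break
--
--     return visited, layer_index
-- ===== SOURCE B (Python) =====
-- def create_leveled_extended_successor_set(front_points, dag, access, extended_set_size=40):
--     visited = []
--     layer_index = {}
--     frontier = list(front_points)
--     layer = 1
--     while frontier and len(visited) < extended_set_size:
--         next_frontier = []
--         stop = False
--         for current in frontier:
--             if current in dag:
--                 for succ in dag[current]:
--                     if succ not in layer_index:
--                         visited.append(succ)
--                         layer_index[succ] = layer + 1
--                         next_frontier.append(succ)
--                         if len(visited) >= extended_set_size: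
--                             stop = True
--                             break
--             if stop:
--                 break
--         if stop:
--             break
--         frontier = next_frontier
--         layer += 1
--     return visited, layer_index
-- ===== Notes on version B (the rewrite author's own statement) =====
-- stated objective: alternative
-- what changed: Replaced A's single deque of (node, layer) pairs with a level-order BFS that keeps the current frontier as a plain list and builds the next frontier level by level, tracking the layer with a counter and breaking out of both loops via a stop flag when the size cap is hit mid-level.
import Mathlib
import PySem

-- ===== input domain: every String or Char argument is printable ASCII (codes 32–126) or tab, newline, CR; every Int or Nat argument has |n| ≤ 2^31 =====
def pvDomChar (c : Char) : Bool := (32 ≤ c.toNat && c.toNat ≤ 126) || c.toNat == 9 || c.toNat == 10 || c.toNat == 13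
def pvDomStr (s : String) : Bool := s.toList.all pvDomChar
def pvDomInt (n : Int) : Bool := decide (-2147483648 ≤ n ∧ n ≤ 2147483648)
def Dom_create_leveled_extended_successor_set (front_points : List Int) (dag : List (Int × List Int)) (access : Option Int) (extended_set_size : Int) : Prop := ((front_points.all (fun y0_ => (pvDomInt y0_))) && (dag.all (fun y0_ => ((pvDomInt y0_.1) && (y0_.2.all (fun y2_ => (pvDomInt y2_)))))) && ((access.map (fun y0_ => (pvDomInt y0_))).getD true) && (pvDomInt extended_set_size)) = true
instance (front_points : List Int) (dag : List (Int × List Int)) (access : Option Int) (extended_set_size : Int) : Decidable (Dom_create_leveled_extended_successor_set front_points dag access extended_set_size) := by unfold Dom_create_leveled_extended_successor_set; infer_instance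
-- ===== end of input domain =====

-- B is a level-order (layer-by-layer) BFS over whole frontiers instead of A's single deque of
-- (node, layer) pairs; same return value, objective: alternative decomposition (same cost).

-- ===== PORT A =====

-- dict lookup on the association list (first match), shared by both ports ('current in dag' / dag[current])
def pvLookup (dag : List (Int × List Int)) (k : Int) : Option (List Int) :=
  (dag.find? (fun p => p.1 == k)).map (fun p => p.2)

-- inner 'for succ in dag[current]' of A: state (visited, layer_index, queue); early return = break
def pvInnerA (size : Int) (l : Int) :
    List Int → List Int × List (Int × Int) × List (Int × Int) →
    List Int × List (Int × Int) × List (Int × Int)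
  | [], st => st
  | s :: rest, (vis, li, q) =>
    if li.any (fun p => p.1 == s) then pvInnerA size l rest (vis, li, q)
    else
      let vis' := vis ++ [s]
      let li' := li ++ [(s, l + 1)]
      let q' := q ++ [(s, l + 1)]
      if size ≤ (vis'.length : Int) then (vis', li', q')
      else pvInnerA size l rest (vis', li', q')

-- the 'while queue and len(visited) < extended_set_size' loop of A (fuel bounds the number of pops;
-- front_points.length + total successor-entry count + 1 pops can never be exceeded, see lemmas below)
def pvLoopA (dag : List (Int × List Int)) (size : Int) :
    Nat → List (Int × Int) → List Int → List (Int × Int) → List Int × List (Int × Int)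
  | 0, _, vis, li => (vis, li)
  | _ + 1, [], vis, li => (vis, li)
  | n + 1, (cur, l) :: rest, vis, li =>
    if (vis.length : Int) < size then
      match pvLookup dag cur with
      | none => pvLoopA dag size n rest vis li
      | some succs =>
        let st := pvInnerA size l succs (vis, li, rest)
        pvLoopA dag size n st.2.2 st.1 st.2.1
    else (vis, li)

def create_leveled_extended_successor_set (front_points : List Int) (dag : List (Int × List Int)) (access : Option Int) (extended_set_size : Int) : List Int × (List (Int × Int)) :=
  pvLoopA dag extended_set_size
    (front_points.length + ((dag.map (fun p => p.2)).flatten).length + 1)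
    (front_points.map (fun p => (p, 1))) [] []

-- ===== PORT B =====

-- inner 'for succ in dag[current]' of B: state (visited, layer_index, next_frontier), Bool = stop flag
def pvInnerB (size : Int) (l : Int) :
    List Int → List Int × List (Int × Int) × List Int →
    List Int × List (Int × Int) × List Int × Bool
  | [], (vis, li, nxt) => (vis, li, nxt, false)
  | s :: rest, (vis, li, nxt) =>
    if li.any (fun p => p.1 == s) then pvInnerB size l rest (vis, li, nxt)
    else
      let vis' := vis ++ [s]
      let li' := li ++ [(s, l + 1)]
      let nxt' := nxt ++ [s]
      if size ≤ (vis'.length : Int) then (vis', li', nxt', true)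
      else pvInnerB size l rest (vis', li', nxt')

-- 'for current in frontier' of B (one whole level)
def pvLevelB (dag : List (Int × List Int)) (size : Int) (l : Int) :
    List Int → List Int × List (Int × Int) × List Int →
    List Int × List (Int × Int) × List Int × Bool
  | [], (vis, li, nxt) => (vis, li, nxt, false)
  | c :: cs, (vis, li, nxt) =>
    match pvLookup dag c with
    | none => pvLevelB dag size l cs (vis, li, nxt)
    | some succs =>
      match pvInnerB size l succs (vis, li, nxt) with
      | (vis', li', nxt', true) => (vis', li', nxt', true)
      | (vis', li', nxt', false) => pvLevelB dag size l cs (vis', li', nxt')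

-- B's outer while loop (fuel bounds the number of levels)
def pvLoopB (dag : List (Int × List Int)) (size : Int) :
    Nat → List Int → Int → List Int → List (Int × Int) → List Int × List (Int × Int)
  | 0, _, _, vis, li => (vis, li)
  | n + 1, frontier, l, vis, li =>
    if frontier ≠ [] ∧ (vis.length : Int) < size then
      match pvLevelB dag size l frontier (vis, li, []) with
      | (vis', li', _, true) => (vis', li')
      | (vis', li', nxt, false) => pvLoopB dag size n nxt (l + 1) vis' li'
    else (vis, li)

def create_leveled_extended_successor_set_alt (front_points : List Int) (dag : List (Int × List Int)) (access : Option Int) (extended_set_size : Int) : List Int × (List (Int × Int)) :=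
  pvLoopB dag extended_set_size
    (front_points.length + ((dag.map (fun p => p.2)).flatten).length + 1)
    front_points 1 [] []

-- ===== PRECONDITION & SPEC =====
def Spec_create_leveled_extended_successor_set (front_points : List Int) (dag : List (Int × List Int)) (access : Option Int) (extended_set_size : Int) (out : List Int × (List (Int × Int))) : Prop := out = create_leveled_extended_successor_set_alt front_points dag access extended_set_size
instance (front_points : List Int) (dag : List (Int × List Int)) (access : Option Int) (extended_set_size : Int) (out : List Int × (List (Int × Int))) : Decidable (Spec_create_leveled_extended_successor_set front_points dag access extended_set_size out) := by unfold Spec_create_leveled_extended_successor_set; infer_instance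

-- ===== CLAIM (what is proved, stated in full; the proofs are below) =====
def Claim_equal_create_leveled_extended_successor_set : Prop := ∀ (front_points : List Int) (dag : List (Int × List Int)) (access : Option Int) (extended_set_size : Int), Dom_create_leveled_extended_successor_set front_points dag access extended_set_size → Spec_create_leveled_extended_successor_set front_points dag access extended_set_size (create_leveled_extended_successor_set front_points dag access extended_set_size)

-- ===== LEMMAS AND PROOFS =====

-- number of 'fresh' potential keys: successor entries of dag not yet in the layer index
def pvFresh (dag : List (Int × List Int)) (li : List (Int × Int)) : Nat :=
  (((dag.map (fun p => p.2)).flatten).dedup.filter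
    (fun s => ! li.any (fun p => p.1 == s))).length

lemma pvLoopA_stop (dag : List (Int × List Int)) (size : Int) (n : Nat)
    (q : List (Int × Int)) (vis : List Int) (li : List (Int × Int))
    (h : ¬ ((vis.length : Int) < size)) : pvLoopA dag size n q vis li = (vis, li) := by
  cases n with
  | zero => rfl
  | succ n =>
    cases q with
    | nil => rfl
    | cons hd tl => obtain ⟨cur, l⟩ := hd; simp [pvLoopA, h]

lemma pvLoopA_nil (dag : List (Int × List Int)) (size : Int) (n : Nat)
    (vis : List Int) (li : List (Int × Int)) : pvLoopA dag size n [] vis li = (vis, li) := by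
  cases n <;> rfl

lemma pvLoopB_nil (dag : List (Int × List Int)) (size : Int) (m : Nat) (l : Int)
    (vis : List Int) (li : List (Int × Int)) : pvLoopB dag size m [] l vis li = (vis, li) := by
  cases m with
  | zero => rfl
  | succ m => simp [pvLoopB]

-- correspondence of the two inner loops
lemma pvInner_corr (size l : Int) (succs : List Int)
    (vis : List Int) (li : List (Int × Int)) (rest : List (Int × Int)) (g : List Int) :
    pvInnerA size l succs (vis, li, rest ++ g.map (fun s => (s, l + 1))) =
      (let st := pvInnerB size l succs (vis, li, g)
       (st.1, st.2.1, rest ++ st.2.2.1.map (fun s => (s, l + 1)))) := by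
  induction succs generalizing vis li g with
  | nil => simp [pvInnerA, pvInnerB]
  | cons s ss ih =>
    simp only [pvInnerA, pvInnerB]
    by_cases hmem : li.any (fun p => p.1 == s) = true
    · simp only [hmem, if_true]; exact ih vis li g
    · simp only [Bool.not_eq_true] at hmem
      simp only [hmem, Bool.false_eq_true, if_false]
      split_ifs with hsz
      · simp [List.map_append, List.append_assoc]
      · have := ih (vis ++ [s]) (li ++ [(s, l + 1)]) (g ++ [s])
        simpa [List.map_append, List.append_assoc] using this

-- visited-length bookkeeping of the inner loop
lemma pvInnerB_flag (size l : Int) (succs : List Int)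
    (vis : List Int) (li : List (Int × Int)) (g : List Int)
    (h : (vis.length : Int) < size) :
    (if (pvInnerB size l succs (vis, li, g)).2.2.2 = true
     then size ≤ ((pvInnerB size l succs (vis, li, g)).1.length : Int)
     else ((pvInnerB size l succs (vis, li, g)).1.length : Int) < size) := by
  induction succs generalizing vis li g with
  | nil => simpa [pvInnerB] using h
  | cons s ss ih =>
    simp only [pvInnerB]
    by_cases hmem : li.any (fun p => p.1 == s) = true
    · simp only [hmem, if_true]; exact ih vis li g h
    · simp only [Bool.not_eq_true] at hmem
      simp only [hmem, Bool.false_eq_true, if_false]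
      by_cases hsz : size ≤ (((vis ++ [s]).length : Nat) : Int)
      · rw [if_pos hsz]; simpa using hsz
      · rw [if_neg hsz]
        refine ih (vis ++ [s]) (li ++ [(s, l + 1)]) (g ++ [s]) ?_
        simp only [List.length_append, List.length_cons, List.length_nil] at hsz ⊢
        push_cast at hsz ⊢
        omega

lemma pvLevelB_flag (dag : List (Int × List Int)) (size l : Int) (f : List Int)
    (vis : List Int) (li : List (Int × Int)) (g : List Int)
    (h : (vis.length : Int) < size) :
    (if (pvLevelB dag size l f (vis, li, g)).2.2.2 = true
     then size ≤ ((pvLevelB dag size l f (vis, li, g)).1.length : Int)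
     else ((pvLevelB dag size l f (vis, li, g)).1.length : Int) < size) := by
  induction f generalizing vis li g with
  | nil => simpa [pvLevelB] using h
  | cons c cs ih =>
    simp only [pvLevelB]
    cases hlk : pvLookup dag c with
    | none => simp only []; exact ih vis li g h
    | some succs =>
      simp only []
      have hin := pvInnerB_flag size l succs vis li g h
      rcases hst : pvInnerB size l succs (vis, li, g) with ⟨vis', li', nxt', flag⟩
      rw [hst] at hin
      cases flag with
      | true => simp only []; simpa using hin
      | false =>
        simp only []
        exact ih vis' li' nxt' (by simpa using hin)

lemma pvFresh_append (dag : List (Int × List Int)) (li : List (Int × Int)) (s v : Int)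
    (hs : s ∈ (dag.map (fun p => p.2)).flatten)
    (hnot : li.any (fun p => p.1 == s) = false) :
    pvFresh dag (li ++ [(s, v)]) + 1 ≤ pvFresh dag li := by
  unfold pvFresh
  have hpred : ((dag.map (fun p => p.2)).flatten).dedup.filter
      (fun x => ! (li ++ [(s, v)]).any (fun p => p.1 == x)) =
      (((dag.map (fun p => p.2)).flatten).dedup.filter
        (fun x => ! li.any (fun p => p.1 == x))).filter (fun x => ! (s == x)) := by
    rw [List.filter_filter]
    congr 1
    funext x
    simp [List.any_append, Bool.and_comm]
  rw [hpred]
  have hmem : s ∈ ((dag.map (fun p => p.2)).flatten).dedup.filter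
      (fun x => ! li.any (fun p => p.1 == x)) := by
    rw [List.mem_filter]
    exact ⟨List.mem_dedup.mpr hs, by simp [hnot]⟩
  have : ((((dag.map (fun p => p.2)).flatten).dedup.filter
      (fun x => ! li.any (fun p => p.1 == x))).filter (fun x => ! (s == x))).length <
      (((dag.map (fun p => p.2)).flatten).dedup.filter
        (fun x => ! li.any (fun p => p.1 == x))).length := by
    apply List.length_filter_lt_length_iff_exists.mpr
    exact ⟨s, hmem, by simp⟩
  omega

lemma pvFresh_le (dag : List (Int × List Int)) (li : List (Int × Int)) :
    pvFresh dag li ≤ ((dag.map (fun p => p.2)).flatten).length := by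
  unfold pvFresh
  calc _ ≤ ((dag.map (fun p => p.2)).flatten).dedup.length := List.length_filter_le _ _
    _ ≤ _ := List.Sublist.length_le (List.dedup_sublist _)

lemma pvLookup_sub (dag : List (Int × List Int)) (c : Int) (succs : List Int)
    (h : pvLookup dag c = some succs) :
    ∀ s ∈ succs, s ∈ (dag.map (fun p => p.2)).flatten := by
  intro s hs
  unfold pvLookup at h
  cases hf : dag.find? (fun p => p.1 == c) with
  | none => rw [hf] at h; simp at h
  | some pr =>
    rw [hf] at h; simp at h
    have hmem := List.mem_of_find?_eq_some hf
    rw [List.mem_flatten]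
    exact ⟨pr.2, List.mem_map_of_mem hmem, h ▸ hs⟩

-- fresh-count accounting for the inner loop (each appended next-frontier node removes one fresh key)
lemma pvInnerB_fresh (dag : List (Int × List Int)) (size l : Int) (succs : List Int)
    (hsub : ∀ s ∈ succs, s ∈ (dag.map (fun p => p.2)).flatten)
    (vis : List Int) (li : List (Int × Int)) (g : List Int) :
    (pvInnerB size l succs (vis, li, g)).2.2.1.length +
      pvFresh dag (pvInnerB size l succs (vis, li, g)).2.1 ≤ g.length + pvFresh dag li := by
  induction succs generalizing vis li g with
  | nil => simp [pvInnerB]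
  | cons s ss ih =>
    simp only [pvInnerB]
    by_cases hmem : li.any (fun p => p.1 == s) = true
    · simp only [hmem, if_true]
      exact ih (fun x hx => hsub x (List.mem_cons_of_mem _ hx)) vis li g
    · simp only [Bool.not_eq_true] at hmem
      simp only [hmem, Bool.false_eq_true, if_false]
      have hdec := pvFresh_append dag li s (l + 1) (hsub s List.mem_cons_self) hmem
      split_ifs with hsz
      · simp only [List.length_append, List.length_cons, List.length_nil]
        omega
      · have := ih (fun x hx => hsub x (List.mem_cons_of_mem _ hx))
          (vis ++ [s]) (li ++ [(s, l + 1)]) (g ++ [s])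
        simp only [List.length_append, List.length_cons, List.length_nil] at this ⊢
        omega

lemma pvLevelB_fresh (dag : List (Int × List Int)) (size l : Int) (f : List Int)
    (vis : List Int) (li : List (Int × Int)) (g : List Int) :
    (pvLevelB dag size l f (vis, li, g)).2.2.1.length +
      pvFresh dag (pvLevelB dag size l f (vis, li, g)).2.1 ≤ g.length + pvFresh dag li := by
  induction f generalizing vis li g with
  | nil => simp [pvLevelB]
  | cons c cs ih =>
    simp only [pvLevelB]
    cases hlk : pvLookup dag c with
    | none => simp only []; exact ih vis li g
    | some succs =>
      simp only []
      have hin := pvInnerB_fresh dag size l succs (pvLookup_sub dag c succs hlk) vis li g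
      rcases hst : pvInnerB size l succs (vis, li, g) with ⟨vis', li', nxt', flag⟩
      rw [hst] at hin
      simp only at hin
      cases flag with
      | true => simpa using hin
      | false =>
        simp only []
        have := ih vis' li' nxt'
        omega

-- one whole level of A equals B's level step
lemma pvBridge (dag : List (Int × List Int)) (size l : Int) (f g : List Int)
    (vis : List Int) (li : List (Int × Int)) (n : Nat)
    (h : (vis.length : Int) < size) :
    pvLoopA dag size (f.length + n) (f.map (fun x => (x, l)) ++ g.map (fun s => (s, l + 1))) vis li =
      (match pvLevelB dag size l f (vis, li, g) with
       | (vis', li', _, true) => (vis', li')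
       | (vis', li', nxt, false) => pvLoopA dag size n (nxt.map (fun s => (s, l + 1))) vis' li') := by
  induction f generalizing g vis li with
  | nil => simp [pvLevelB]
  | cons c cs ih =>
    have hlen : (c :: cs).length + n = (cs.length + n) + 1 := by simp; omega
    rw [hlen]
    simp only [List.map_cons, List.cons_append, pvLoopA, pvLevelB, h, if_true]
    cases hlk : pvLookup dag c with
    | none => simp only []; exact ih g vis li h
    | some succs =>
      simp only []
      have hcorr := pvInner_corr size l succs vis li (cs.map (fun x => (x, l))) g
      simp only at hcorr
      rw [hcorr]
      have hfl := pvInnerB_flag size l succs vis li g h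
      rcases hst : pvInnerB size l succs (vis, li, g) with ⟨vis', li', nxt', flag⟩
      rw [hst] at hfl
      cases flag with
      | true =>
        simp only [if_true] at hfl
        simp only []
        exact pvLoopA_stop dag size _ _ vis' li' (by omega)
      | false =>
        simp only [Bool.false_eq_true, if_false] at hfl
        simp only []
        exact ih nxt' vis' li' hfl

-- main correspondence, by induction on B's fuel
lemma pvMain (dag : List (Int × List Int)) (size : Int) :
    ∀ (m a : Nat) (f : List Int) (l : Int) (vis : List Int) (li : List (Int × Int)),
    (vis.length : Int) < size →
    f.length + pvFresh dag li ≤ a →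
    1 + pvFresh dag li ≤ m →
    pvLoopA dag size a (f.map (fun x => (x, l))) vis li = pvLoopB dag size m f l vis li := by
  intro m
  induction m with
  | zero => intro a f l vis li _ _ hm; omega
  | succ m ih =>
    intro a f l vis li h ha hm
    cases f with
    | nil => simp only [List.map_nil]; rw [pvLoopA_nil, pvLoopB_nil]
    | cons c cs =>
      have hcond : (c :: cs ≠ []) ∧ (vis.length : Int) < size := ⟨by simp, h⟩
      simp only [pvLoopB]
      rw [if_pos hcond]
      have hsplit : a = (c :: cs).length + (a - (c :: cs).length) := by
        simp at ha ⊢; omega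
      rw [hsplit]
      have hb := pvBridge dag size l (c :: cs) [] vis li (a - (c :: cs).length) h
      simp only [List.map_nil, List.append_nil] at hb
      rw [hb]
      have hfl := pvLevelB_flag dag size l (c :: cs) vis li [] h
      have hfr := pvLevelB_fresh dag size l (c :: cs) vis li []
      rcases hst : pvLevelB dag size l (c :: cs) (vis, li, []) with ⟨vis', li', nxt, flag⟩
      rw [hst] at hfl hfr
      cases flag with
      | true => simp only []
      | false =>
        simp only [Bool.false_eq_true, if_false] at hfl
        simp only [List.length_nil, Nat.zero_add] at hfr
        simp only []
        cases hn : nxt with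
        | nil => simp only [List.map_nil]; rw [pvLoopA_nil, pvLoopB_nil]
        | cons x xs =>
          rw [← hn]
          apply ih
          · exact hfl
          · omega
          · have hlen : 1 ≤ nxt.length := by rw [hn]; simp
            omega

-- ===== VERDICT (by name: the statement is the Claim_ definition above) =====
theorem create_leveled_extended_successor_set_spec : Claim_equal_create_leveled_extended_successor_set := by
  intro front_points dag access size _
  unfold Spec_create_leveled_extended_successor_set
  unfold create_leveled_extended_successor_set create_leveled_extended_successor_set_alt
  by_cases h : ((0 : Int) < size)
  · exact pvMain dag size _ _ front_points 1 [] []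
      (by simpa using h)
      (by have := pvFresh_le dag ([] : List (Int × Int)); omega)
      (by have := pvFresh_le dag ([] : List (Int × Int)); omega)
  · rw [pvLoopA_stop dag size _ _ [] [] (by simpa using h)]
    simp [pvLoopB, h]
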